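-- pv_equiv track=rewrite | github.com/VincenzoLipardi/GNN | models/gnn_run_oslo.py | _extract_range_after_token
-- ===== SOURCE A (Python) =====
-- from typing import Any, Dict, List, Optional, Tuple
--
-- def _extract_range_after_token(name: str, token: str) -> Tuple[Optional[int], Optional[int]]:
--     try:
--         pos = name.index(token) + len(token)
--         start_digits: List[str] = []
--         while pos < len(name) and name[pos].isdigit():
--             start_digits.append(name[pos])
--             pos += 1
--         if not start_digits:
--             return None, None
--         start_val = int("".join(start_digits))
--         if pos < len(name) and name[pos] == '-':
--             pos += 1
--             end_digits: List[str] = []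
--             while pos < len(name) and name[pos].isdigit():
--                 end_digits.append(name[pos])
--                 pos += 1
--             if end_digits:
--                 end_val = int("".join(end_digits))
--             else:
--                 end_val = start_val
--         else:
--             end_val = start_val
--         return start_val, end_val
--     except Exception:
--         return None, None
-- ===== SOURCE B (Python) =====
-- from itertools import groupby
-- from typing import Optional, Tuple
--
--
-- def _extract_range_after_token(name: str, token: str) -> Tuple[Optional[int], Optional[int]]:
--     pos = name.find(token)
--     if pos == -1:
--         return None, None
--     # run-length decomposition of the suffix into maximal digit / non-digit runs
--     runs = ["".join(g) for _, g in groupby(name[pos + len(token):], key=str.isdigit)]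
--     if not runs or not runs[0].isdigit():
--         return None, None
--     start = int(runs[0])
--     end = int(runs[2]) if len(runs) >= 3 and runs[1] == '-' else start
--     return start, end
-- ===== Notes on version B (the rewrite author's own statement) =====
-- stated objective: alternative
-- what changed: Replaces A's try/except with two index-driven digit-scanning while-loops by a run-length decomposition: the suffix after the token is grouped with itertools.groupby into maximal digit/non-digit runs and the answer is read off the first three runs by pattern matching.
import Mathlib
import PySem

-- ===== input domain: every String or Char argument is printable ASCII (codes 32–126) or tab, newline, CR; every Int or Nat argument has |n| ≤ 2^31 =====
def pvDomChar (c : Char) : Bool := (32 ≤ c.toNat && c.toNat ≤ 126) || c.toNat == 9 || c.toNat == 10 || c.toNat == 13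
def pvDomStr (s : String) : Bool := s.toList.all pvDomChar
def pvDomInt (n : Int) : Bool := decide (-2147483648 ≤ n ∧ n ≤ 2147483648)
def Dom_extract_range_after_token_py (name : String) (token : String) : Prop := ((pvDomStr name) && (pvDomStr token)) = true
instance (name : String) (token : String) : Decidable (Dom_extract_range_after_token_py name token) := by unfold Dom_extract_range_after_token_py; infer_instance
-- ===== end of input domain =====

-- B replaces A's try/except with two index-driven digit-scanning while-loops by a
-- run-length decomposition of the suffix (groupby into maximal digit/non-digit runs)
-- read off by pattern matching: objective 'alternative'.

-- ===== PORT A =====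
-- A's while loop 'while pos < len(name) and name[pos].isdigit(): append; pos += 1',
-- returning the final pos and the accumulated digit list.
def pvA_scan (cs : List Char) (pos : Nat) (acc : List Char) : Nat × List Char :=
  if h : pos < cs.length then
    if PySem.Chars.isdigit cs[pos] then pvA_scan cs (pos + 1) (acc ++ [cs[pos]])
    else (pos, acc)
  else (pos, acc)
termination_by cs.length - pos

def extract_range_after_token_py (name : String) (token : String) : Option Int × Option Int :=
  let cs := name.toList
  -- name.index(token): raises ValueError when absent, caught by the except → (None, None)
  let f := PySem.Chars.find cs token.toList
  if f = -1 then (none, none)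
  else
    let pos0 := f.toNat + token.length
    let (pos1, sd) := pvA_scan cs pos0 []
    if sd = [] then (none, none)
    else
      -- int("".join(start_digits)): never raises on a nonempty digit run, so the default is unreachable
      let startVal := (PySem.Int.ofChars? sd).getD 0
      if pos1 < cs.length ∧ cs.getD pos1 ' ' = '-' then
        let (_, ed) := pvA_scan cs (pos1 + 1) []
        if ed = [] then (some startVal, some startVal)
        else (some startVal, some ((PySem.Int.ofChars? ed).getD 0))
      else (some startVal, some startVal)

-- ===== PORT B =====
-- itertools.groupby(s, key=str.isdigit) joined back to strings: the maximal runs of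
-- characters with equal isdigit-key, in order.
def pvGroupRuns (s : List Char) : List (List Char) :=
  match s with
  | [] => []
  | c :: t =>
    let k := PySem.Chars.isdigit c
    (c :: t.takeWhile (fun d => PySem.Chars.isdigit d == k)) ::
      pvGroupRuns (t.dropWhile (fun d => PySem.Chars.isdigit d == k))
termination_by s.length
decreasing_by
  simp only [List.length_cons]
  exact Nat.lt_succ_of_le (List.length_dropWhile_le _ _)

def extract_range_after_token_py_alt (name : String) (token : String) : Option Int × Option Int :=
  let pos := PySem.Chars.find name.toList token.toList
  if pos = -1 then (none, none)
  else
    let runs := pvGroupRuns (name.toList.drop (pos.toNat + token.length))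
    match runs with
    | [] => (none, none)                                  -- 'not runs'
    | r0 :: rest =>
      if ! PySem.Chars.strIsdigit r0 then (none, none)    -- 'not runs[0].isdigit()'
      else
        -- int(runs[0]): r0 is a nonempty digit run, so the default is unreachable
        let start := (PySem.Int.ofChars? r0).getD 0
        match rest with
        | r1 :: r2 :: _ =>
          if r1 = ['-'] then (some start, some ((PySem.Int.ofChars? r2).getD 0))
          else (some start, some start)
        | _ => (some start, some start)

-- ===== PRECONDITION & SPEC =====
def Spec_extract_range_after_token_py (name : String) (token : String) (out : Option Int × Option Int) : Prop := out = extract_range_after_token_py_alt name token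
instance (name : String) (token : String) (out : Option Int × Option Int) : Decidable (Spec_extract_range_after_token_py name token out) := by unfold Spec_extract_range_after_token_py; infer_instance

-- ===== CLAIM (what is proved, stated in full; the proofs are below) =====
def Claim_equal_extract_range_after_token_py : Prop := ∀ (name : String) (token : String), Dom_extract_range_after_token_py name token → Spec_extract_range_after_token_py name token (extract_range_after_token_py name token)

-- ===== LEMMAS AND PROOFS =====

theorem pvA_scan_spec (cs : List Char) (pos : Nat) (acc : List Char) :
    pvA_scan cs pos acc =
      (pos + ((cs.drop pos).takeWhile PySem.Chars.isdigit).length,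
       acc ++ (cs.drop pos).takeWhile PySem.Chars.isdigit) := by
  induction pos, acc using pvA_scan.induct cs with
  | case1 pos acc h hd ih =>
    rw [pvA_scan, dif_pos h, if_pos hd, ih,
      List.drop_eq_getElem_cons h, List.takeWhile_cons, hd]
    simp; omega
  | case2 pos acc h hd =>
    rw [pvA_scan, dif_pos h, if_neg hd,
      List.drop_eq_getElem_cons h, List.takeWhile_cons]
    simp [hd]
  | case3 pos acc h =>
    rw [pvA_scan, dif_neg h, List.drop_eq_nil_of_le (by omega)]
    simp

theorem pv_drop_len_takeWhile (p : Char → Bool) (l : List Char) :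
    l.drop ((l.takeWhile p).length) = l.dropWhile p := by
  induction l with
  | nil => simp
  | cons a t ih => by_cases h : p a <;> simp [h, ih]

-- A's "pos1 < len ∧ name[pos1] = '-'" test, read as a statement about the suffix list
theorem pv_dash_iff (cs : List Char) (k : Nat) :
    (k < cs.length ∧ cs.getD k ' ' = '-') ↔ ∃ u, cs.drop k = '-' :: u := by
  constructor
  · rintro ⟨hk, hc⟩
    simp [List.getD, List.getElem?_eq_getElem hk] at hc
    exact ⟨_, by rw [List.drop_eq_getElem_cons hk, hc]⟩
  · rintro ⟨u, hu⟩
    by_cases hk : k < cs.length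
    · refine ⟨hk, ?_⟩
      rw [List.drop_eq_getElem_cons hk] at hu
      injection hu with h1 _
      simp [List.getD, List.getElem?_eq_getElem hk, h1]
    · rw [List.drop_eq_nil_of_le (by omega)] at hu; simp at hu

-- if the head of l is a digit, the first run of pvGroupRuns is exactly takeWhile isdigit
theorem pvGroupRuns_digit_head (c : Char) (t : List Char) (hc : PySem.Chars.isdigit c = true) :
    pvGroupRuns (c :: t) =
      ((c :: t).takeWhile PySem.Chars.isdigit) ::
        pvGroupRuns ((c :: t).dropWhile PySem.Chars.isdigit) := by
  rw [pvGroupRuns]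
  simp only [List.takeWhile_cons, List.dropWhile_cons, hc]
  congr 2 <;> [skip; skip] <;>
  · congr 1
    funext d
    cases h : PySem.Chars.isdigit d <;> simp

-- ===== VERDICT (by name: the statement is the Claim_ definition above) =====
theorem extract_range_after_token_py_spec : Claim_equal_extract_range_after_token_py := by
  intro name token _
  unfold Spec_extract_range_after_token_py
  simp only [extract_range_after_token_py, extract_range_after_token_py_alt]
  by_cases h0 : PySem.Chars.find name.toList token.toList = -1
  · simp [h0]
  · simp only [h0, if_false]
    rw [pvA_scan_spec]
    generalize hcs : name.toList = cs at h0 ⊢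
    generalize (PySem.Chars.find cs token.toList).toNat + token.length = pos0
    simp only [List.nil_append]
    -- the suffix A scans and B groups
    generalize hs : cs.drop pos0 = s
    have hafter : ∀ j, cs.drop (pos0 + j) = s.drop j := by
      intro j; rw [← hs, List.drop_drop, Nat.add_comm]
    cases s with
    | nil => simp [pvGroupRuns]
    | cons c t =>
      by_cases hc : PySem.Chars.isdigit c = true
      · -- first run is the digit prefix
        rw [pvGroupRuns_digit_head c t hc]
        have h1 : (c :: t).takeWhile PySem.Chars.isdigit ≠ [] := by
          simp [hc]
        simp only [h1, if_false]
        have hstr : PySem.Chars.strIsdigit ((c :: t).takeWhile PySem.Chars.isdigit) = true := by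
          -- nonempty and all digits
          rcases h : (c :: t).takeWhile PySem.Chars.isdigit with _ | ⟨a, u⟩
          · exact absurd h h1
          · have hall := List.takeWhile_subset (l := c :: t) (p := PySem.Chars.isdigit)
            simp only [PySem.Chars.strIsdigit]
            have : ∀ x ∈ a :: u, PySem.Chars.isdigit x = true := by
              intro x hx
              exact List.mem_takeWhile_imp (l := c :: t) (p := PySem.Chars.isdigit) (h ▸ hx)
            simp [List.all_eq_true]
            exact ⟨this a (by simp), fun x hx => this x (by simp [hx])⟩
        simp only [hstr, Bool.not_true, Bool.false_eq_true, if_false]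
        -- now compare the dash / end-digit handling
        have hdrop1 : cs.drop (pos0 + ((c :: t).takeWhile PySem.Chars.isdigit).length)
            = (c :: t).dropWhile PySem.Chars.isdigit := by
          rw [hafter, pv_drop_len_takeWhile]
        rcases hrest : (c :: t).dropWhile PySem.Chars.isdigit with _ | ⟨d, u⟩
        · -- suffix exhausted: no dash, runs = [r0]
          have hnd : ¬ (pos0 + ((c :: t).takeWhile PySem.Chars.isdigit).length < cs.length ∧
              cs.getD (pos0 + ((c :: t).takeWhile PySem.Chars.isdigit).length) ' ' = '-') := by
            rw [pv_dash_iff, hdrop1, hrest]; rintro ⟨u, h⟩; cases h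
          rw [if_neg hnd]
          simp [pvGroupRuns]
        · by_cases hd : d = '-'
          · subst hd
            have hyes : pos0 + ((c :: t).takeWhile PySem.Chars.isdigit).length < cs.length ∧
                cs.getD (pos0 + ((c :: t).takeWhile PySem.Chars.isdigit).length) ' ' = '-' := by
              rw [pv_dash_iff, hdrop1, hrest]; exact ⟨u, rfl⟩
            rw [if_pos hyes]
            simp only [pvA_scan_spec, List.nil_append]
            have hdropdash : cs.drop (pos0 + ((c :: t).takeWhile PySem.Chars.isdigit).length + 1) = u := by
              have h2 : cs.drop (pos0 + ((c :: t).takeWhile PySem.Chars.isdigit).length + 1)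
                  = List.drop 1 (cs.drop (pos0 + ((c :: t).takeWhile PySem.Chars.isdigit).length)) := by
                rw [List.drop_drop]
              rw [h2, hdrop1, hrest]; simp
            rw [hdropdash]
            -- B side: group the '-'-headed rest
            have hdashkey : PySem.Chars.isdigit '-' = false := by decide
            rw [pvGroupRuns]
            simp only [hdashkey]
            rcases hu : u with _ | ⟨e, v⟩
            · -- nothing after dash: end_digits empty, r1 = ['-'], no r2
              simp [pvGroupRuns]
            · by_cases he : PySem.Chars.isdigit e = true
              · -- digits after dash: r1 = ['-'], r2 = digit run
                have h2 : (e :: v).takeWhile PySem.Chars.isdigit ≠ [] := by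
                  simp [he]
                simp [he, hc, pvGroupRuns_digit_head e v he]
              · -- non-digit after dash: end_digits empty, r1 = '-'::e::… ≠ ['-']
                have he' : PySem.Chars.isdigit e = false := by
                  cases h : PySem.Chars.isdigit e; rfl; exact absurd h he
                simp only [List.takeWhile_cons, List.dropWhile_cons, he', hc,
                  beq_self_eq_true, if_true, Bool.false_eq_true, if_false]
                split
                · rename_i r1 r2 tail heq
                  obtain ⟨h1, -⟩ := List.cons.inj heq
                  rw [if_neg (by rw [← h1]; simp)]
                · rfl
          · -- head of rest is a non-dash non-digit: A takes the no-dash branch,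
            -- B's r1 starts with d ≠ '-'
            have hnd : ¬ (pos0 + ((c :: t).takeWhile PySem.Chars.isdigit).length < cs.length ∧
                cs.getD (pos0 + ((c :: t).takeWhile PySem.Chars.isdigit).length) ' ' = '-') := by
              rw [pv_dash_iff, hdrop1, hrest]
              rintro ⟨w, h⟩; injection h with h1 _; exact hd h1
            rw [if_neg hnd, pvGroupRuns]
            split
            · rename_i r1 r2 tail heq
              obtain ⟨h1, -⟩ := List.cons.inj heq
              have hne : ¬ r1 = ['-'] := by
                rw [← h1]; intro hx; injection hx with hx1 _; exact hd hx1
              rw [if_neg hne]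
            · rfl
      · -- first char of suffix is not a digit: both return (none, none)
        have hc' : PySem.Chars.isdigit c = false := by
          cases h : PySem.Chars.isdigit c; rfl; exact absurd h hc
        rw [pvGroupRuns]
        simp [hc', PySem.Chars.strIsdigit]
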